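-- pv_equiv track=rewrite | github.com/crash-and-compile/dc32-problems | quagmire-hard/generator.py | quagmire_encrypt
-- ===== SOURCE A (Python) =====
-- def create_custom_alphabet(key):
--     base_alphabet = "ABCDEFGHIJKLMNOPQRSTUVWXYZ"
--     key_unique = ''.join(sorted(set(key), key=lambda x: key.index(x)))
--     remaining_letters = ''.join([c for c in base_alphabet if c not in key_unique])
--     custom_alphabet = key_unique + remaining_letters
--     return custom_alphabet
--
-- def create_vigenere_table(custom_alphabet):
--     base_alphabet = "ABCDEFGHIJKLMNOPQRSTUVWXYZ"
--     table = []
--     for i in range(len(base_alphabet)):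
--         shifted_alphabet = custom_alphabet[i:] + custom_alphabet[:i]
--         table.append(shifted_alphabet)
--     return table
--
-- def quagmire_encrypt(plaintext, key1, key2):
--     custom_alphabet = create_custom_alphabet(key1)
--     vigenere_table = create_vigenere_table(custom_alphabet)
--
--     key2_index = 0
--     ciphertext = ""
--
--     for pt_char in plaintext.upper():
--         if pt_char in custom_alphabet:
--             k2_char = key2[key2_index % len(key2)].upper()
--             row = custom_alphabet.index(k2_char)
--             col = custom_alphabet.index(pt_char)
--             ciphertext += vigenere_table[row][col]
--             key2_index += 1
--         else:
--             ciphertext += pt_char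
--
--     return ciphertext
-- ===== SOURCE B (Python) =====
-- def quagmire_encrypt(plaintext, key1, key2):
--     # staged pipeline: build keyed alphabet, extract the letter stream,
--     # encrypt it as a whole against the repeating key, then merge it back.
--     seen = dict.fromkeys(key1)
--     alphabet = ''.join(seen) + ''.join(
--         c for c in "ABCDEFGHIJKLMNOPQRSTUVWXYZ" if c not in seen)
--     pos = {c: i for i, c in enumerate(alphabet)}
--     up = plaintext.upper()
--     # pass 1: the subsequence of characters that get encrypted
--     letters = [c for c in up if c in pos]
--     # pass 2: encrypt that stream; its position IS the key2 index, no counter needed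
--     enc = [alphabet[(pos[key2[i % len(key2)].upper()] + pos[c]) % len(alphabet)]
--            for i, c in enumerate(letters)]
--     # pass 3: weave the encrypted stream back into the non-letter skeleton
--     it = iter(enc)
--     return ''.join(next(it) if c in pos else c for c in up)
-- ===== Notes on version B (the rewrite author's own statement) =====
-- stated objective: alternative
-- what changed: B replaces A's single stateful pass (running key2 counter, precomputed 26x26 Vigenere table, repeated .index scans) by a staged pipeline: extract the encryptable letter subsequence, encrypt that whole stream in one comprehension where the stream position itself is the key2 index (using alphabet[(i+j)%L] instead of the table), then weave the encrypted stream back into the pass-through skeleton.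
import Mathlib
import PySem

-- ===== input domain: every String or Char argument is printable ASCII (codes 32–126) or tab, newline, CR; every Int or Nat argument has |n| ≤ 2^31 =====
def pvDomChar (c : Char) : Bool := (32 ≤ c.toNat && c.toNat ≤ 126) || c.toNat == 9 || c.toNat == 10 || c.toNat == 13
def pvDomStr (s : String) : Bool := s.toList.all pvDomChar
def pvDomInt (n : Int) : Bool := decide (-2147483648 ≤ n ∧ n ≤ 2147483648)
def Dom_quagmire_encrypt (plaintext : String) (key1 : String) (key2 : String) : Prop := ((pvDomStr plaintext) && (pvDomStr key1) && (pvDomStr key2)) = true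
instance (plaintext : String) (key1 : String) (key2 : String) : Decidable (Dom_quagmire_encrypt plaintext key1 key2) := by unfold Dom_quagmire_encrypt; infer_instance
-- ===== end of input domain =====

-- B replaces A's single stateful pass over a precomputed Vigenère table by a staged
-- pipeline: extract the letter subsequence, encrypt that stream in one pass where the
-- stream position is the key2 index (via alphabet[(i+j)%L]), then weave it back.

-- ===== PORT A =====
def qBase : List Char := "ABCDEFGHIJKLMNOPQRSTUVWXYZ".toList

def create_custom_alphabet (key : String) : List Char :=
  -- key_unique = ''.join(sorted(set(key), key=lambda x: key.index(x)))
  -- key.index(x) is always a hit for x ∈ set(key), so the `.getD 0` default is never taken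
  let key_unique := PySem.List.sorted (PySem.Set.ofList key.toList)
      (fun x => (PySem.List.index? key.toList x).getD 0)
  key_unique ++ qBase.filter (fun c => !(key_unique.contains c))

def create_vigenere_table (custom_alphabet : List Char) : List (List Char) :=
  (List.range qBase.length).map (fun (i : Nat) =>
    PySem.List.slice custom_alphabet (some (i : Int)) none ++
    PySem.List.slice custom_alphabet none (some (i : Int)))

def quagmire_encrypt (plaintext : String) (key1 : String) (key2 : String) : String :=
  let custom_alphabet := create_custom_alphabet key1
  let vigenere_table := create_vigenere_table custom_alphabet
  let st := (PySem.Chars.upper plaintext.toList).foldl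
    (fun (st : Int × List Char) pt_char =>
      if custom_alphabet.contains pt_char then
        -- key2[key2_index % len(key2)].upper(); Pre_ rules out len(key2) = 0 here
        let k2_char := PySem.Chars.upperChar
          (PySem.List.pyGetD key2.toList (PySem.Int.mod st.1 (PySem.List.len key2.toList)) 'A')
        -- custom_alphabet.index(...): Pre_ guarantees hits, so `.getD 0` is never taken
        let row := (PySem.List.index? custom_alphabet k2_char).getD 0
        let col := (PySem.List.index? custom_alphabet pt_char).getD 0
        -- vigenere_table[row][col]; Pre_ guarantees row < 26
        (st.1 + 1, st.2 ++ [PySem.List.pyGetD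
            (PySem.List.pyGetD vigenere_table (row : Int) []) (col : Int) 'A'])
      else (st.1, st.2 ++ [pt_char]))
    ((0 : Int), ([] : List Char))
  String.ofList st.2

-- ===== PORT B =====
def qAltAlphabet (key1 : String) : List Char :=
  -- ''.join(dict.fromkeys(key1)) + the unused base letters
  let d := PySem.List.dedup key1.toList
  d ++ qBase.filter (fun c => !(d.contains c))

def qAltIndex (alphabet : List Char) : PySem.Dict Char Int :=
  -- {c: i for i, c in enumerate(alphabet)}
  (PySem.List.enumerate alphabet).foldl (fun d p => d.insert p.2 p.1) PySem.Dict.empty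

-- pass 2: enc = [alphabet[(pos[key2[i % len(key2)].upper()] + pos[c]) % L] for i, c in enumerate(letters)]
-- the comprehension may start its enumerate at any offset; B uses 0
def qAltEnc (alphabet : List Char) (pos : PySem.Dict Char Int) (key2c : List Char)
    (letters : List Char) (start : Int) : List Char :=
  (PySem.List.enumerate letters start).map (fun p =>
    PySem.List.pyGetD alphabet
      (PySem.Int.mod
        (pos.getD (PySem.Chars.upperChar
          (PySem.List.pyGetD key2c (PySem.Int.mod p.1 (PySem.List.len key2c)) 'A')) 0
         + pos.getD p.2 0)
        (PySem.List.len alphabet)) 'A')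

def quagmire_encrypt_alt (plaintext : String) (key1 : String) (key2 : String) : String :=
  let alphabet := qAltAlphabet key1
  let pos := qAltIndex alphabet
  let up := PySem.Chars.upper plaintext.toList
  -- pass 1: the subsequence of characters that get encrypted
  let letters := up.filter (fun c => pos.contains c)
  -- pass 2
  let enc := qAltEnc alphabet pos key2.toList letters 0
  -- pass 3: ''.join(next(it) if c in pos else c for c in up); next(it) never exhausts
  -- since enc has exactly one entry per letter of up, so the [] branch is unreachable
  let st := up.foldl
    (fun (st : List Char × List Char) c =>
      if pos.contains c then
        match st.1 with
        | e :: rest => (rest, st.2 ++ [e])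
        | [] => ([], st.2 ++ [c])
      else (st.1, st.2 ++ [c]))
    (enc, ([] : List Char))
  String.ofList st.2

-- ===== PRECONDITION & SPEC =====
def qGoodKeyChar (alphabet : List Char) (c : Char) : Bool :=
  match PySem.List.index? alphabet (PySem.Chars.upperChar c) with
  | some j => decide (j < 26)
  | none => false

-- Pre_ is exactly the set of inputs on which A returns: A raises (ZeroDivisionError,
-- ValueError or IndexError) iff some letter is encrypted while key2 is empty, or a used
-- key2 character (uppercased) is missing from the custom alphabet or sits at index ≥ 26.
def Pre_quagmire_encrypt (plaintext : String) (key1 : String) (key2 : String) : Prop :=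
  (PySem.Chars.upper plaintext.toList).countP
      (fun c => (qAltAlphabet key1).contains c) = 0 ∨
    (key2.toList ≠ [] ∧
      (key2.toList.take ((PySem.Chars.upper plaintext.toList).countP
        (fun c => (qAltAlphabet key1).contains c))).all
        (fun c => qGoodKeyChar (qAltAlphabet key1) c) = true)
instance (plaintext : String) (key1 : String) (key2 : String) : Decidable (Pre_quagmire_encrypt plaintext key1 key2) := by unfold Pre_quagmire_encrypt; infer_instance

def pvWitness_quagmire_encrypt : String × String × String := ("HELLO WORLD", "KEYONE", "AB")

def Spec_quagmire_encrypt (plaintext : String) (key1 : String) (key2 : String) (out : String) : Prop := out = quagmire_encrypt_alt plaintext key1 key2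
instance (plaintext : String) (key1 : String) (key2 : String) (out : String) : Decidable (Spec_quagmire_encrypt plaintext key1 key2 out) := by unfold Spec_quagmire_encrypt; infer_instance

-- ===== CLAIM (what is proved, stated in full; the proofs are below) =====
def Claim_equal_quagmire_encrypt : Prop := ∀ (plaintext : String) (key1 : String) (key2 : String), Dom_quagmire_encrypt plaintext key1 key2 → Pre_quagmire_encrypt plaintext key1 key2 → Spec_quagmire_encrypt plaintext key1 key2 (quagmire_encrypt plaintext key1 key2)

-- ===== LEMMAS AND PROOFS =====

-- index? over an append when the element misses the left part
lemma index?_append_of_not_mem {α : Type} [BEq α] [LawfulBEq α] (pre t : List α) (x : α)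
    (hx : x ∉ pre) :
    PySem.List.index? (pre ++ t) x = (PySem.List.index? t x).map (pre.length + ·) := by
  induction pre with
  | nil => simp [PySem.List.index?_eq_idxOf?, Option.map_id']
  | cons a pre ih =>
    simp only [List.mem_cons, not_or] at hx
    rw [List.cons_append,
      PySem.List.index?_cons_of_ne (pre ++ t) (Ne.symm hx.1), ih hx.2]
    cases PySem.List.index? t x <;> simp; omega

-- the first-occurrence dedup is ordered by index into the original list
lemma dedup_foldl_pairwise {α : Type} [BEq α] [LawfulBEq α]
    (full : List α) (post : List α) : ∀ (pre : List α) (acc : List α),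
    full = pre ++ post →
    (∀ a, a ∈ acc ↔ a ∈ pre) →
    acc.Pairwise (fun a b =>
      (PySem.List.index? full a).getD 0 < (PySem.List.index? full b).getD 0) →
    (post.foldl PySem.Set.add acc).Pairwise (fun a b =>
      (PySem.List.index? full a).getD 0 < (PySem.List.index? full b).getD 0) := by
  induction post with
  | nil => intro pre acc _ _ h2; simpa using h2
  | cons x rest ih =>
    intro pre acc hfull h1 h2
    simp only [List.foldl_cons]
    by_cases hc : PySem.Set.contains acc x
    · have hadd : PySem.Set.add acc x = acc := by rw [PySem.Set.add]; simp only [hc]; simp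
      rw [hadd]
      refine ih (pre ++ [x]) acc (by simp [hfull]) ?_ h2
      intro a
      rw [h1 a]
      simp only [List.mem_append, List.mem_singleton]
      constructor
      · exact Or.inl
      · rintro (h | rfl)
        · exact h
        · exact (h1 a).1 (by simpa [PySem.Set.contains, List.contains_iff_mem] using hc)
    · have hadd : PySem.Set.add acc x = acc ++ [x] := by
        rw [PySem.Set.add]; simp only [hc]; simp
      rw [hadd]
      have hxacc : x ∉ acc := by simpa [PySem.Set.contains, List.contains_iff_mem] using hc
      have hxpre : x ∉ pre := fun h => hxacc ((h1 x).2 h)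
      refine ih (pre ++ [x]) (acc ++ [x]) (by simp [hfull]) ?_ ?_
      · intro a; simp [h1 a]
      · rw [List.pairwise_append]
        refine ⟨h2, by simp, ?_⟩
        intro a ha b hb
        simp only [List.mem_singleton] at hb
        have hapre : a ∈ pre := (h1 a).1 ha
        have h3 : PySem.List.index? full a = PySem.List.index? pre a := by
          rw [hfull]; exact PySem.List.index?_append_of_mem _ hapre
        have h4 : PySem.List.index? full b = some (pre.length + 0) := by
          rw [hb]
          rw [hfull, index?_append_of_not_mem _ _ _ hxpre,
            PySem.List.index?_cons_self]
          rfl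
        obtain ⟨k, hk⟩ := Option.isSome_iff_exists.1
          ((PySem.List.index?_isSome_iff pre a).2 hapre)
        obtain ⟨hklt, -⟩ := PySem.List.getElem_of_index?_eq_some hk
        rw [h3, h4, hk]
        simp
        omega

-- A's and B's custom alphabets coincide
lemma alphabet_eq (key : String) : create_custom_alphabet key = qAltAlphabet key := by
  have hp := dedup_foldl_pairwise key.toList key.toList [] [] rfl (by simp) (by simp)
  have hs : PySem.List.sorted (PySem.Set.ofList key.toList)
      (fun x => (PySem.List.index? key.toList x).getD 0) = PySem.Set.ofList key.toList :=
    PySem.List.sorted_eq_self_of_pairwise _ _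
      ((show (PySem.Set.ofList key.toList).Pairwise _ from hp).imp le_of_lt)
  simp only [create_custom_alphabet, qAltAlphabet, PySem.List.dedup_eq_ofList, hs]

lemma alphabet_nodup (key : String) : (qAltAlphabet key).Nodup := by
  have hb : qBase.Nodup := by decide
  refine List.Nodup.append (PySem.List.nodup_dedup _) (hb.filter _) ?_
  intro a ha hf
  have := List.of_mem_filter hf
  simp only [Bool.not_eq_eq_eq_not, Bool.not_true, List.contains_eq_mem,
    decide_eq_false_iff_not] at this
  exact this ha

lemma enumerate_map_snd {α : Type} (l : List α) :
    ∀ s : Int, (PySem.List.enumerate l s).map (·.2) = l := by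
  induction l with
  | nil => intro s; simp [PySem.List.enumerate]
  | cons a l ih => intro s; simp [PySem.List.enumerate, ih]

lemma qAltIndex_items (ca : List Char) (hnd : ca.Nodup) :
    (qAltIndex ca).items = (PySem.List.enumerate ca).map (fun p => (p.2, p.1)) := by
  have h := PySem.Dict.items_foldl_insert_fresh (PySem.List.enumerate ca)
    (fun p => p.2) (fun p => p.1) PySem.Dict.empty
    (fun a _ => rfl) (by rw [show (List.map (fun p => p.2) (PySem.List.enumerate ca)) =
      (PySem.List.enumerate ca).map (·.2) from rfl, enumerate_map_snd]; exact hnd)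
  simpa [qAltIndex, PySem.Dict.empty] using h

lemma qAltIndex_contains (ca : List Char) (hnd : ca.Nodup) (c : Char) :
    (qAltIndex ca).contains c = ca.contains c := by
  rw [PySem.Dict.contains, qAltIndex_items ca hnd]
  conv_rhs => rw [← enumerate_map_snd ca 0]
  rw [List.any_map, List.contains_eq_any_beq, List.any_map]
  congr 1
  funext p
  simp [Function.comp, eq_comm]

lemma find?_enumerate (ca : List Char) : ∀ (s : Int) (c : Char) (j : Nat),
    PySem.List.index? ca c = some j →
    ((PySem.List.enumerate ca s).map (fun p => (p.2, p.1))).find?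
      (fun q => q.1 == c) = some (c, s + (j : Int)) := by
  induction ca with
  | nil => intro s c j h; simp [PySem.List.index?_eq_idxOf?] at h
  | cons a t ih =>
    intro s c j h
    by_cases hac : a = c
    · subst hac
      rw [PySem.List.index?_cons_self] at h
      obtain rfl := (Option.some_inj.1 h).symm
      simp [PySem.List.enumerate]
    · rw [PySem.List.index?_cons_of_ne t (by exact hac)] at h
      obtain ⟨j', hj', rfl⟩ := Option.map_eq_some_iff.1 h
      have := ih (s + 1) c j' hj'
      have hbeq : (a == c) = false := by simpa using hac
      simp only [PySem.List.enumerate, List.map_cons, List.find?_cons, hbeq]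
      rw [this]
      congr 1
      rw [Prod.mk.injEq]
      refine ⟨rfl, by push_cast; ring⟩

lemma qAltIndex_getD (ca : List Char) (hnd : ca.Nodup) (c : Char) (j : Nat)
    (hj : PySem.List.index? ca c = some j) :
    (qAltIndex ca).getD c 0 = (j : Int) := by
  rw [PySem.Dict.getD, PySem.Dict.get?, qAltIndex_items ca hnd,
    find?_enumerate ca 0 c j hj]
  simp

-- the rotated row of the Vigenère table is the alphabet read modulo its length
lemma rot_getD (ca : List Char) (r c : Nat) (hr : r ≤ ca.length) (hc : c < ca.length) :
    (ca.drop r ++ ca.take r).getD c 'A' = ca.getD ((r + c) % ca.length) 'A' := by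
  simp only [List.getD]
  by_cases h : r + c < ca.length
  · rw [List.getElem?_append_left (by simp; omega), List.getElem?_drop,
      Nat.mod_eq_of_lt h]
  · have h2 : (r + c) % ca.length = r + c - ca.length := by
      rw [Nat.mod_eq_sub_mod (by omega), Nat.mod_eq_of_lt (by omega)]
    rw [List.getElem?_append_right (by simp; omega), h2]
    simp only [List.length_drop, List.getElem?_take]
    have h3 : c - (ca.length - r) = r + c - ca.length := by omega
    rw [h3, if_pos (by omega)]

-- A's single stateful pass starting at counter k agrees with B's merge pass fed with
-- the encrypted stream of the remaining letters, enumerated from k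
lemma loop_eq (key2c : List Char) (ca : List Char) (hnd : ca.Nodup) :
    ∀ (l : List Char) (k : Nat) (acc : List Char),
    (l.countP (fun c => ca.contains c) = 0 ∨ key2c ≠ []) →
    (∀ m : Nat, m < k + l.countP (fun c => ca.contains c) →
      ∀ hm : m < key2c.length, qGoodKeyChar ca key2c[m] = true) →
    (l.foldl
      (fun (st : Int × List Char) pt_char =>
        if ca.contains pt_char then
          let k2_char := PySem.Chars.upperChar
            (PySem.List.pyGetD key2c (PySem.Int.mod st.1 (PySem.List.len key2c)) 'A')
          let row := (PySem.List.index? ca k2_char).getD 0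
          let col := (PySem.List.index? ca pt_char).getD 0
          (st.1 + 1, st.2 ++ [PySem.List.pyGetD
            (PySem.List.pyGetD (create_vigenere_table ca) (row : Int) []) (col : Int) 'A'])
        else (st.1, st.2 ++ [pt_char])) ((k : Int), acc)).2
    = (l.foldl
      (fun (st : List Char × List Char) c =>
        if (qAltIndex ca).contains c then
          match st.1 with
          | e :: rest => (rest, st.2 ++ [e])
          | [] => ([], st.2 ++ [c])
        else (st.1, st.2 ++ [c]))
      (qAltEnc ca (qAltIndex ca) key2c (l.filter (fun c => (qAltIndex ca).contains c)) (k : Int), acc)).2 := by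
  intro l
  induction l with
  | nil => intro k acc _ _; rfl
  | cons x rest ih =>
    intro k acc hL H
    simp only [List.foldl_cons, List.filter_cons]
    by_cases hmem : ca.contains x
    · -- an encrypted character
      have hmem' : (qAltIndex ca).contains x = true := by
        rw [qAltIndex_contains ca hnd]; exact hmem
      have hxmem : x ∈ ca := by simpa [List.contains_iff_mem] using hmem
      have hcnt : (x :: rest).countP (fun c => ca.contains c) =
          rest.countP (fun c => ca.contains c) + 1 := by
        simp [hxmem]
      have hk2 : key2c ≠ [] := by
        rcases hL with h0 | h
        · rw [hcnt] at h0; exact absurd h0 (by omega)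
        · exact h
      have hL0 : 0 < key2c.length := List.length_pos_iff.2 hk2
      have hmL : k % key2c.length < key2c.length := Nat.mod_lt _ hL0
      have hgood : qGoodKeyChar ca key2c[k % key2c.length] = true := by
        refine H (k % key2c.length) ?_ hmL
        rw [hcnt]
        have := Nat.mod_le k key2c.length
        omega
      have hkc : PySem.List.pyGetD key2c (PySem.Int.mod ((k : Int)) (PySem.List.len key2c)) 'A'
          = key2c[k % key2c.length] := by
        rw [PySem.List.len_eq, PySem.Int.mod_natCast, PySem.List.pyGetD_natCast,
          List.getD_eq_getElem _ _ hmL]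
      obtain ⟨j, hidx, hj26⟩ : ∃ j, PySem.List.index? ca
          (PySem.Chars.upperChar key2c[k % key2c.length]) = some j ∧ j < 26 := by
        unfold qGoodKeyChar at hgood
        cases hcase : PySem.List.index? ca (PySem.Chars.upperChar key2c[k % key2c.length]) with
        | none => rw [hcase] at hgood; simp at hgood
        | some j => rw [hcase] at hgood; simp at hgood; exact ⟨j, rfl, hgood⟩
      have hjlt : j < ca.length := by
        obtain ⟨h, -⟩ := PySem.List.getElem_of_index?_eq_some hidx; exact h
      obtain ⟨jc, hcol⟩ : ∃ jc, PySem.List.index? ca x = some jc := by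
        refine Option.isSome_iff_exists.1 ((PySem.List.index?_isSome_iff ca x).2 ?_)
        simpa [List.contains_iff_mem] using hmem
      have hjclt : jc < ca.length := by
        obtain ⟨h, -⟩ := PySem.List.getElem_of_index?_eq_some hcol; exact h
      -- A's table cell equals B's modular lookup
      have hcell : PySem.List.pyGetD
            (PySem.List.pyGetD (create_vigenere_table ca) ((j : Nat) : Int) []) ((jc : Nat) : Int) 'A'
          = PySem.List.pyGetD ca
            (PySem.Int.mod ((j : Int) + (jc : Int)) (PySem.List.len ca)) 'A' := by
        have hq : qBase.length = 26 := by decide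
        have htab : (create_vigenere_table ca).getD j [] = ca.drop j ++ ca.take j := by
          have h1 : (create_vigenere_table ca)[j]? =
              some (PySem.List.slice ca (some (j : Int)) none ++
                PySem.List.slice ca none (some (j : Int))) := by
            rw [create_vigenere_table, hq, List.getElem?_map,
              List.getElem?_range hj26]
            rfl
          rw [List.getD_eq_getElem?_getD, h1, Option.getD_some,
            PySem.List.slice_from_natCast, PySem.List.slice_to_natCast]
        rw [PySem.List.pyGetD_natCast, PySem.List.pyGetD_natCast, htab,
          rot_getD ca j jc (le_of_lt hjlt) hjclt]
        rw [PySem.List.len_eq]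
        rw [show ((j : Int) + (jc : Int)) = ((j + jc : Nat) : Int) by push_cast; ring,
          PySem.Int.mod_natCast, PySem.List.pyGetD_natCast]
      -- the head of B's encrypted stream is exactly A's cell
      have henc : qAltEnc ca (qAltIndex ca) key2c
          (x :: rest.filter (fun c => (qAltIndex ca).contains c)) (k : Int)
        = PySem.List.pyGetD
            (PySem.List.pyGetD (create_vigenere_table ca) ((j : Nat) : Int) []) ((jc : Nat) : Int) 'A'
          :: qAltEnc ca (qAltIndex ca) key2c
            (rest.filter (fun c => (qAltIndex ca).contains c)) ((k : Int) + 1) := by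
        simp only [qAltEnc, PySem.List.enumerate, List.map_cons]
        congr 1
        rw [hkc, qAltIndex_getD ca hnd _ j hidx, qAltIndex_getD ca hnd x jc hcol, hcell]
      rw [if_pos hmem, if_pos hmem', if_pos hmem', henc]
      simp only [hkc, hidx, hcol, Option.getD_some]
      have hstep : ((k : Int) + 1) = (((k + 1 : Nat)) : Int) := by push_cast; ring
      rw [hstep]
      refine ih (k + 1) _ (Or.inr hk2) ?_
      intro m hm hmlen
      refine H m ?_ hmlen
      rw [hcnt]; omega
    · -- a pass-through character
      have hmem' : (qAltIndex ca).contains x = false := by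
        rw [qAltIndex_contains ca hnd]; simpa using hmem
      have hxmem : x ∉ ca := by simpa [List.contains_iff_mem] using hmem
      have hcnt : (x :: rest).countP (fun c => ca.contains c) =
          rest.countP (fun c => ca.contains c) := by
        simp [hxmem]
      rw [if_neg hmem, if_neg (by simp [hmem']), if_neg (by simp [hmem'])]
      refine ih k _ ?_ ?_
      · rcases hL with h0 | h
        · left; rw [hcnt] at h0; exact h0
        · right; exact h
      · intro m hm hmlen
        refine H m ?_ hmlen
        rw [hcnt]; exact hm

-- ===== VERDICT (by name: the statement is the Claim_ definition above) =====
theorem quagmire_encrypt_spec : Claim_equal_quagmire_encrypt := by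
  intro plaintext key1 key2 _hdom hpre
  unfold Spec_quagmire_encrypt
  unfold Pre_quagmire_encrypt at hpre
  have hnd := alphabet_nodup key1
  have hL : (PySem.Chars.upper plaintext.toList).countP
      (fun c => (qAltAlphabet key1).contains c) = 0 ∨ key2.toList ≠ [] := by
    rcases hpre with h0 | h
    · exact Or.inl h0
    · exact Or.inr h.1
  have H : ∀ m : Nat, m < 0 + (PySem.Chars.upper plaintext.toList).countP
      (fun c => (qAltAlphabet key1).contains c) →
      ∀ hm : m < key2.toList.length,
        qGoodKeyChar (qAltAlphabet key1) key2.toList[m] = true := by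
    intro m hm hmlen
    rcases hpre with h0 | h
    · rw [h0] at hm; omega
    · refine List.all_eq_true.mp h.2 key2.toList[m] ?_
      have h5 : m < (key2.toList.take ((PySem.Chars.upper plaintext.toList).countP
          (fun c => (qAltAlphabet key1).contains c))).length := by
        rw [List.length_take]; omega
      have h6 : (key2.toList.take ((PySem.Chars.upper plaintext.toList).countP
          (fun c => (qAltAlphabet key1).contains c)))[m]'h5 = key2.toList[m] :=
        List.getElem_take
      rw [← h6]
      exact List.getElem_mem h5
  have hmain := loop_eq key2.toList (qAltAlphabet key1) hnd
    (PySem.Chars.upper plaintext.toList) 0 [] hL H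
  simp only [Nat.cast_zero] at hmain
  simp only [quagmire_encrypt, quagmire_encrypt_alt, alphabet_eq key1]
  rw [hmain]
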